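-- pv_equiv track=rewrite | github.com/partyzl/bookstack | server/bookstack/stats/views.py | most_common_decade
-- ===== SOURCE A (Python) =====
-- def most_common_decade(decades):
--     counter = 0
--     decade = decades[0]
--     for i in decades:
--         current_decade = decades.count(i)
--         if current_decade > counter:
--             counter = current_decade
--             decade = i
--     return decade
-- ===== SOURCE B (Python) =====
-- def most_common_decade(decades):
--     counts = {}
--     for d in decades:
--         counts[d] = counts.get(d, 0) + 1
--     best = max(counts.values())
--     return next(d for d in decades if counts[d] == best)
-- ===== Notes on version B (the rewrite author's own statement) =====
-- stated objective: faster
-- what changed: B counts occurrences into a dict in one pass, takes the maximum count with max(), and returns the first list element attaining it with a generator search, instead of A's running argmax that rescans the whole list with count() at every element.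
import Mathlib
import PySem

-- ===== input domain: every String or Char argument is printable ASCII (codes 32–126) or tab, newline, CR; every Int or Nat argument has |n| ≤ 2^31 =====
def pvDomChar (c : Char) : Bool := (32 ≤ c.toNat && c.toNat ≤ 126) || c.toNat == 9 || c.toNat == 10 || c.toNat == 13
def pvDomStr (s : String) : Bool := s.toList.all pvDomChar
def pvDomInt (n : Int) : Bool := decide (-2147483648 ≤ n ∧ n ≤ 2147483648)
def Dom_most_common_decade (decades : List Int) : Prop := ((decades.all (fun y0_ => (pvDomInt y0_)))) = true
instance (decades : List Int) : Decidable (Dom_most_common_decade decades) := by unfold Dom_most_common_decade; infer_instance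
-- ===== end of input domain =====

-- B replaces A's running argmax with repeated full-list count() scans by one counting pass,
-- max() over the counts, and a first-match search — asymptotically faster (O(n) vs O(n^2)).

-- ===== PORT A =====
def most_common_decade (decades : List Int) : Int :=
  let counter : Int := 0
  let decade : Int := PySem.List.pyGetD decades 0 0
  let st := decades.foldl
    (fun (st : Int × Int) i =>
      let current_decade : Int := (PySem.List.count decades i : Int)
      if current_decade > st.1 then (current_decade, i) else st)
    (counter, decade)
  st.2

-- ===== PORT B =====
def most_common_decade_alt (decades : List Int) : Int :=
  let counts : PySem.Dict Int Int :=
    decades.foldl (fun (d : PySem.Dict Int Int) x => d.insert x (d.getD x 0 + 1)) PySem.Dict.empty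
  -- max(counts.values()): ValueError on empty, i.e. none here (outside Pre_)
  match PySem.List.max? counts.values (fun v => v) with
  | none => 0
  | some best =>
    -- next(d for d in decades if counts[d] == best); every d ∈ decades is a key of counts,
    -- so counts.getD d 0 is exact, and the generator always yields (list nonempty here)
    (decades.find? (fun d => counts.getD d 0 == best)).getD 0

-- ===== PRECONDITION & SPEC =====
-- A raises IndexError on the empty list (decades[0]); B raises ValueError there (max of empty).
def Pre_most_common_decade (decades : List Int) : Prop := decades ≠ []
instance (decades : List Int) : Decidable (Pre_most_common_decade decades) := by
  unfold Pre_most_common_decade; infer_instance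
def pvWitness_most_common_decade : List Int := [1990, 1990, 1980]

def Spec_most_common_decade (decades : List Int) (out : Int) : Prop := out = most_common_decade_alt decades
instance (decades : List Int) (out : Int) : Decidable (Spec_most_common_decade decades out) := by unfold Spec_most_common_decade; infer_instance

-- ===== CLAIM (what is proved, stated in full; the proofs are below) =====
def Claim_equal_most_common_decade : Prop := ∀ (decades : List Int), Dom_most_common_decade decades → Pre_most_common_decade decades → Spec_most_common_decade decades (most_common_decade decades)

-- ===== LEMMAS AND PROOFS =====

-- A's loop step, parametrised by the (fixed) count function N.
def pvStep (N : Int → Int) (st : Int × Int) (i : Int) : Int × Int :=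
  if N i > st.1 then (N i, i) else st

lemma pv_init_le_foldl_max (v : List Int) (a : Int) : a ≤ v.foldl max a := by
  induction v generalizing a with
  | nil => simp
  | cons y t ih => exact le_trans (le_max_left a y) (ih (max a y))

lemma pv_le_foldl_max (v : List Int) (a b : Int) (hb : b ∈ v) : b ≤ v.foldl max a := by
  induction v generalizing a with
  | nil => cases hb
  | cons y t ih =>
    rcases List.mem_cons.1 hb with h | h
    · subst h
      exact le_trans (le_max_right a b) (pv_init_le_foldl_max t (max a b))
    · exact ih (max a y) h

lemma pv_foldl_max_le (v : List Int) (a c : Int) (h : ∀ y ∈ v, y ≤ c) (ha : a ≤ c) :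
    v.foldl max a ≤ c := by
  induction v generalizing a with
  | nil => simpa using ha
  | cons y t ih =>
    exact ih (max a y) (fun z hz => h z (List.mem_cons_of_mem _ hz))
      (max_le ha (h y (List.mem_cons_self)))

lemma pv_foldl_max_mem (v : List Int) (a : Int) :
    v.foldl max a = a ∨ v.foldl max a ∈ v := by
  induction v generalizing a with
  | nil => left; rfl
  | cons y t ih =>
    rcases ih (max a y) with h | h
    · simp only [List.foldl_cons, h]
      rcases max_cases a y with ⟨h1, _⟩ | ⟨h1, _⟩
      · left; exact h1
      · right; simp [h1]
    · right; exact List.mem_cons_of_mem _ h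

-- Characterisation of A's strict-improvement argmax loop.
lemma pv_foldA (N : Int → Int) (l : List Int) (s : Int × Int) :
    l.foldl (pvStep N) s =
      ((l.map N).foldl max s.1,
       if s.1 < (l.map N).foldl max s.1
       then (l.find? (fun i => N i == (l.map N).foldl max s.1)).getD s.2
       else s.2) := by
  induction l generalizing s with
  | nil => simp
  | cons x t ih =>
    have hfst : (pvStep N s x).1 = max s.1 (N x) := by
      unfold pvStep; split_ifs with h <;> simp <;> omega
    have hM : ((x :: t).map N).foldl max s.1 = (t.map N).foldl max (max s.1 (N x)) := by
      simp
    rw [List.foldl_cons, ih (pvStep N s x), hfst, hM]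
    set Mt := (t.map N).foldl max (max s.1 (N x)) with hMt
    have hMt_ge : max s.1 (N x) ≤ Mt := pv_init_le_foldl_max _ _
    refine Prod.ext rfl ?_
    simp only
    by_cases hx : N x > s.1
    · have hs2 : (pvStep N s x).2 = x := by unfold pvStep; rw [if_pos hx]
      have hs1 : (pvStep N s x).1 = N x := by rw [hfst]; omega
      have hmaxeq : max s.1 (N x) = N x := by omega
      rw [hs2, hmaxeq]
      by_cases hMx : N x < Mt
      · -- max exceeds N x, found strictly later: head is not a hit
        have hne : (N x == Mt) = false := by
          simp only [beq_eq_false_iff_ne, ne_eq]; omega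
        rw [if_pos hMx, if_pos (by omega), List.find?_cons_of_neg (by simp [hne])]
        -- find? is some: Mt is attained in t
        rcases pv_foldl_max_mem (t.map N) (max s.1 (N x)) with h | h
        · omega
        · rcases List.mem_map.1 h with ⟨k, hk, hNk⟩
          have : (t.find? (fun i => N i == Mt)).isSome := by
            rw [List.find?_isSome]
            exact ⟨k, hk, by simp [hNk, hMt]⟩
          rcases Option.isSome_iff_exists.1 this with ⟨z, hz⟩
          simp [hz]
      · have hMteq : Mt = N x := by omega
        rw [if_neg hMx, if_pos (by omega), List.find?_cons_of_pos (by simp [hMteq])]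
        simp
    · have hs' : pvStep N s x = s := by unfold pvStep; rw [if_neg hx]
      rw [hs'] at *
      have hfst' : max s.1 (N x) = s.1 := by omega
      rw [hfst'] at hMt hMt_ge ⊢
      by_cases hMs : s.1 < Mt
      · have hne : (N x == Mt) = false := by
          simp only [beq_eq_false_iff_ne, ne_eq]; omega
        rw [if_pos hMs, if_pos hMs, List.find?_cons_of_neg (by simp [hne])]
      · rw [if_neg hMs, if_neg hMs]

-- ===== VERDICT (by name: the statement is the Claim_ definition above) =====
theorem most_common_decade_spec : Claim_equal_most_common_decade := by
  intro decades _ hpre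
  unfold Spec_most_common_decade most_common_decade most_common_decade_alt
  obtain ⟨x, t, rfl⟩ := List.exists_cons_of_ne_nil hpre
  set N : Int → Int := fun i => ((x :: t).count i : Int) with hN
  -- ----- A's side -----
  have hstepA :
      (fun (st : Int × Int) i =>
          if (PySem.List.count (x :: t) i : Int) > st.1 then ((PySem.List.count (x :: t) i : Int), i) else st)
        = pvStep N := by
    funext st i; simp [pvStep, PySem.List.count, hN]
  simp only [hstepA, PySem.List.pyGetD_zero_cons]
  rw [pv_foldA N (x :: t) (0, x)]
  set Mx := ((x :: t).map N).foldl max (0 : Int) with hMx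
  have hNx_mem : N x ∈ (x :: t).map N := List.mem_map_of_mem (by simp)
  have hNx_pos : 0 < N x := by
    have : 0 < (x :: t).count x := List.count_pos_iff.2 (by simp)
    simp only [hN]; exact_mod_cast this
  have hMx_ge : N x ≤ Mx := pv_le_foldl_max _ _ _ hNx_mem
  have hMx_pos : (0 : Int) < Mx := lt_of_lt_of_le hNx_pos hMx_ge
  simp only
  rw [if_pos hMx_pos]
  -- ----- B's side -----
  rw [PySem.Dict.foldl_insert_getD_add_one_eq_counter]
  have hvals : (PySem.Dict.counter (x :: t)).values = (PySem.Set.ofList (x :: t)).map N := by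
    simp only [PySem.Dict.values, PySem.Dict.items_counter, List.map_map]
    rfl
  rw [hvals]
  -- the max over the distinct counts is some Mx
  have hmax : PySem.List.max? ((PySem.Set.ofList (x :: t)).map N) (fun v => v) = some Mx := by
    have hne : ((PySem.Set.ofList (x :: t)).map N) ≠ [] := by
      have hx : x ∈ PySem.Set.ofList (x :: t) := (PySem.Set.mem_ofList _ x).2 (by simp)
      intro h
      exact (List.ne_nil_of_mem hx) (List.map_eq_nil_iff.1 h)
    have hsome : PySem.List.max? ((PySem.Set.ofList (x :: t)).map N) (fun v => v) ≠ none := by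
      rw [Ne, PySem.List.max?_eq_none_iff]; exact hne
    rcases Option.ne_none_iff_exists'.1 hsome with ⟨b, hb⟩
    have hb_mem := PySem.List.max?_mem hb
    have hb_max := PySem.List.max?_isMax hb
    rcases List.mem_map.1 hb_mem with ⟨k, hk, hNk⟩
    have hk_l : k ∈ x :: t := (PySem.Set.mem_ofList _ k).1 hk
    have hble : b ≤ Mx := pv_le_foldl_max _ _ _ (hNk ▸ List.mem_map_of_mem hk_l)
    have hbge : Mx ≤ b := by
      apply pv_foldl_max_le
      · intro y hy
        rcases List.mem_map.1 hy with ⟨k2, hk2, hNk2⟩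
        exact hNk2 ▸ hb_max (N k2) (List.mem_map_of_mem ((PySem.Set.mem_ofList _ k2).2 hk2))
      · have h0 : (0 : Int) ≤ N k := by simp [hN]
        omega
    rw [hb, le_antisymm hble hbge]
  rw [hmax]
  show (List.find? (fun i => N i == Mx) (x :: t)).getD x
      = (List.find? (fun d => (PySem.Dict.counter (x :: t)).getD d 0 == Mx) (x :: t)).getD 0
  -- the two find? predicates agree, and find? is some
  have hpred : (fun d => (PySem.Dict.counter (x :: t)).getD d 0 == Mx) = (fun i => N i == Mx) := by
    funext d; rw [PySem.Dict.getD_counter]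
  rw [hpred]
  rcases pv_foldl_max_mem ((x :: t).map N) 0 with h | h
  · omega
  · rcases List.mem_map.1 h with ⟨k, hk, hNk⟩
    have hs : ((x :: t).find? (fun i => N i == Mx)).isSome := by
      rw [List.find?_isSome]; exact ⟨k, hk, by simp [hNk, hMx]⟩
    rcases Option.isSome_iff_exists.1 hs with ⟨z, hz⟩
    simp [hz]
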